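-- pv_equiv track=rewrite | github.com/CoderFake/PhoneComparison | backend/app/utils/helpers.py | normalize_brand_name
-- ===== SOURCE A (Python) =====
-- def normalize_brand_name(brand: str) -> str:
--     """
--     Chuẩn hóa tên thương hiệu.
--     """
--     if not brand:
--         return "Unknown"
--
--     # Mapping các tên thương hiệu phổ biến
--     brand_mapping = {
--         'ip': 'Apple',
--         'iphone': 'Apple',
--         'apple': 'Apple',
--         'sam': 'Samsung',
--         'samsung': 'Samsung',
--         'ss': 'Samsung',
--         'xiaomi': 'Xiaomi',
--         'mi': 'Xiaomi',
--         'redmi': 'Xiaomi',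
--         'poco': 'Xiaomi',
--         'oppo': 'Oppo',
--         'vivo': 'Vivo',
--         'realme': 'Realme',
--         'nokia': 'Nokia',
--         'itel': 'Itel',
--         'vsmart': 'VinSmart',
--         'lg': 'LG',
--         'sony': 'Sony',
--         'huawei': 'Huawei',
--         'honor': 'Honor',
--         'asus': 'Asus',
--         'oneplus': 'OnePlus',
--         'tecno': 'Tecno',
--         'mobell': 'Mobell',
--         'masstel': 'Masstel'
--     }
--
--     brand_lower = brand.lower().strip()
--     for key, value in brand_mapping.items():
--         if key == brand_lower or brand_lower.startswith(key + ' '):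
--             return value
--
--     # Nếu không tìm thấy trong mapping, trả về tên với chữ cái đầu viết hoa
--     return brand.strip().title()
-- ===== SOURCE B (Python) =====
-- def normalize_brand_name(brand: str) -> str:
--     """Normalize a brand name: inverted alias-group table + one-pass first-token extraction."""
--     if not brand:
--         return "Unknown"
--
--     groups = {
--         'Apple': ['ip', 'iphone', 'apple'],
--         'Samsung': ['sam', 'samsung', 'ss'],
--         'Xiaomi': ['xiaomi', 'mi', 'redmi', 'poco'],
--         'Oppo': ['oppo'],
--         'Vivo': ['vivo'],
--         'Realme': ['realme'],
--         'Nokia': ['nokia'],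
--         'Itel': ['itel'],
--         'VinSmart': ['vsmart'],
--         'LG': ['lg'],
--         'Sony': ['sony'],
--         'Huawei': ['huawei'],
--         'Honor': ['honor'],
--         'Asus': ['asus'],
--         'OnePlus': ['oneplus'],
--         'Tecno': ['tecno'],
--         'Mobell': ['mobell'],
--         'Masstel': ['masstel'],
--     }
--     alias = {a: name for name, aliases in groups.items() for a in aliases}
--
--     brand_lower = brand.lower().strip()
--     token = ''
--     for ch in brand_lower:
--         if ch == ' ':
--             break
--         token += ch
--
--     if token in alias:
--         return alias[token]
--     return brand.strip().title()
-- ===== Notes on version B (the rewrite author's own statement) =====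
-- stated objective: alternative
-- what changed: A scans all 25 flat mapping keys testing exact equality or a space-extended-prefix match; B inverts the table into brand->alias groups, builds an alias dictionary from it, extracts the first space-delimited token in a single character pass, and does one lookup.
import Mathlib
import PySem

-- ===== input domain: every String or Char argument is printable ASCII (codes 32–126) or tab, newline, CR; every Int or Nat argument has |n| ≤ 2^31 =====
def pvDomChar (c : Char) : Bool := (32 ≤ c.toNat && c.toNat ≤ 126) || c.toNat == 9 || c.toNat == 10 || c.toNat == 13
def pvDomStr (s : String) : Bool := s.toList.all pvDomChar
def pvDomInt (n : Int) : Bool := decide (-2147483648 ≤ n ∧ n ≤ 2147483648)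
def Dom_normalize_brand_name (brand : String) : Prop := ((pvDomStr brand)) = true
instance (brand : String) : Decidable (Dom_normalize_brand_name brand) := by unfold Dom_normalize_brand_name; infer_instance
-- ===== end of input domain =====

-- B replaces A's flat per-key scan (exact match or "key "-prefix test against every mapping key)
-- by an inverted brand->aliases table folded into an alias dictionary, a single character pass
-- extracting the first space-delimited token, and one lookup (alternative decomposition).


-- ===== PORT A =====
-- the literal dict from A's source (keys distinct, so the association list is the literal pair list)
def brandPairs : List (String × String) :=
  [("ip", "Apple"), ("iphone", "Apple"), ("apple", "Apple"),
   ("sam", "Samsung"), ("samsung", "Samsung"), ("ss", "Samsung"),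
   ("xiaomi", "Xiaomi"), ("mi", "Xiaomi"), ("redmi", "Xiaomi"), ("poco", "Xiaomi"),
   ("oppo", "Oppo"), ("vivo", "Vivo"), ("realme", "Realme"), ("nokia", "Nokia"),
   ("itel", "Itel"), ("vsmart", "VinSmart"), ("lg", "LG"), ("sony", "Sony"),
   ("huawei", "Huawei"), ("honor", "Honor"), ("asus", "Asus"),
   ("oneplus", "OnePlus"), ("tecno", "Tecno"), ("mobell", "Mobell"),
   ("masstel", "Masstel")]

-- Python's str.title(), ported by hand, exact on ASCII
-- (a letter after a non-letter is uppercased, any other letter lowercased)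
def pyTitleGo : List Char → Bool → List Char
  | [], _ => []
  | c :: rest, prevAlpha =>
      if PySem.Chars.isalpha c then
        (if prevAlpha then PySem.Chars.lowerChar c else PySem.Chars.upperChar c) :: pyTitleGo rest true
      else c :: pyTitleGo rest false

def pyTitle (s : String) : String := String.ofList (pyTitleGo s.toList false)

-- A's `for key, value in brand_mapping.items(): if key == bl or bl.startswith(key + ' '): return value`
def scanBrand : List (String × String) → String → Option String
  | [], _ => none
  | (k, v) :: rest, bl =>
      if k == bl || PySem.Str.startswith bl (k ++ " ") then some v else scanBrand rest bl

def normalize_brand_name (brand : String) : String :=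
  if brand == "" then "Unknown"
  else
    let brand_lower := PySem.Str.strip (PySem.Str.lower brand)
    match scanBrand brandPairs brand_lower with
    | some v => v
    | none => pyTitle (PySem.Str.strip brand)

-- ===== PORT B =====
-- Source B's inverted table: brand name -> list of aliases (A's dict grouped by value)
def brandGroups : List (String × List String) :=
  [("Apple", ["ip", "iphone", "apple"]),
   ("Samsung", ["sam", "samsung", "ss"]),
   ("Xiaomi", ["xiaomi", "mi", "redmi", "poco"]),
   ("Oppo", ["oppo"]),
   ("Vivo", ["vivo"]),
   ("Realme", ["realme"]),
   ("Nokia", ["nokia"]),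
   ("Itel", ["itel"]),
   ("VinSmart", ["vsmart"]),
   ("LG", ["lg"]),
   ("Sony", ["sony"]),
   ("Huawei", ["huawei"]),
   ("Honor", ["honor"]),
   ("Asus", ["asus"]),
   ("OnePlus", ["oneplus"]),
   ("Tecno", ["tecno"]),
   ("Mobell", ["mobell"]),
   ("Masstel", ["masstel"])]

-- Source B's `alias = {a: name for name, aliases in groups.items() for a in aliases}`
def brandAlias : PySem.Dict String String :=
  brandGroups.foldl (fun d p => p.2.foldl (fun d a => d.insert a p.1) d) (PySem.Dict.mk [])

-- Source B's `for ch in brand_lower: if ch == ' ': break; token += ch`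
def firstTok : List Char → List Char
  | [] => []
  | c :: rest => if c = ' ' then [] else c :: firstTok rest

-- Source B's `.title()` fallback, as a left fold with a (reversed-output, prev-is-alpha) accumulator
def titleFold (s : String) : String :=
  String.ofList
    ((s.toList.foldl
        (fun (st : List Char × Bool) c =>
          if PySem.Chars.isalpha c then
            ((if st.2 then PySem.Chars.lowerChar c else PySem.Chars.upperChar c) :: st.1, true)
          else (c :: st.1, false))
        ([], false)).1.reverse)

def normalize_brand_name_alt (brand : String) : String :=
  if brand == "" then "Unknown"
  else
    let brand_lower := PySem.Str.strip (PySem.Str.lower brand)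
    let token := String.ofList (firstTok brand_lower.toList)
    match PySem.Dict.get? brandAlias token with
    | some v => v
    | none => titleFold (PySem.Str.strip brand)

-- ===== PRECONDITION & SPEC =====
def Spec_normalize_brand_name (brand : String) (out : String) : Prop := out = normalize_brand_name_alt brand
instance (brand : String) (out : String) : Decidable (Spec_normalize_brand_name brand out) := by unfold Spec_normalize_brand_name; infer_instance

-- ===== CLAIM (what is proved, stated in full; the proofs are below) =====
def Claim_equal_normalize_brand_name : Prop := ∀ (brand : String), Dom_normalize_brand_name brand → Spec_normalize_brand_name brand (normalize_brand_name brand)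

-- ===== LEMMAS AND PROOFS =====

-- B's alias dict, built by folding the inverted groups, is exactly A's literal pair list
theorem brandAlias_entries : brandAlias = PySem.Dict.mk brandPairs := by decide

-- B's one-pass token is takeWhile (· ≠ ' ')
theorem firstTok_eq (cs : List Char) : firstTok cs = cs.takeWhile (· ≠ ' ') := by
  induction cs with
  | nil => rfl
  | cons c rest ih =>
      by_cases hc : c = ' ' <;> simp [firstTok, List.takeWhile, hc, ih]

-- B's fold-based title equals A's recursive title
theorem titleFold_go (cs : List Char) : ∀ (acc : List Char) (prev : Bool),
    (cs.foldl
        (fun (st : List Char × Bool) c =>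
          if PySem.Chars.isalpha c then
            ((if st.2 then PySem.Chars.lowerChar c else PySem.Chars.upperChar c) :: st.1, true)
          else (c :: st.1, false))
        (acc, prev)).1.reverse = acc.reverse ++ pyTitleGo cs prev := by
  induction cs with
  | nil => intro acc prev; simp [pyTitleGo]
  | cons c rest ih =>
      intro acc prev
      by_cases hc : PySem.Chars.isalpha c <;> simp [pyTitleGo, hc, ih]

theorem titleFold_eq (s : String) : titleFold s = pyTitle s := by
  unfold titleFold pyTitle
  rw [titleFold_go s.toList [] false]
  rfl

-- list level: a nonempty space-free kl matches (exact or "kl ++ ' '"-prefix) iff it is the first token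
theorem tok_iff (kl cl : List Char) (hk : ' ' ∉ kl) :
    (kl = cl ∨ (kl ++ [' ']) <+: cl) ↔ cl.takeWhile (fun x => decide (x ≠ ' ')) = kl := by
  have hall : ∀ x ∈ kl, decide (x ≠ ' ') = true := by
    intro x hx
    simp only [decide_eq_true_eq]
    intro hx'
    exact hk (hx' ▸ hx)
  constructor
  · rintro (rfl | ⟨t, ht⟩)
    · exact List.takeWhile_eq_self_iff.mpr hall
    · subst ht
      rw [List.append_assoc, List.takeWhile_append,
        if_pos (by rw [List.takeWhile_eq_self_iff.mpr hall])]
      simp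
  · intro h
    rcases hd : cl.dropWhile (fun x => decide (x ≠ ' ')) with _ | ⟨d, t⟩
    · left
      have := List.takeWhile_append_dropWhile (p := fun x => decide (x ≠ ' ')) (l := cl)
      rw [h, hd] at this
      simpa using this
    · right
      have hdnot := List.head_dropWhile_not (fun x => decide (x ≠ ' ')) (l := cl)
        (hd ▸ List.cons_ne_nil d t)
      simp only [hd] at hdnot
      simp only [List.head_cons, decide_not, Bool.not_eq_false', decide_eq_true_eq] at hdnot
      refine ⟨t, ?_⟩
      have := List.takeWhile_append_dropWhile (p := fun x => decide (x ≠ ' ')) (l := cl)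
      rw [h, hd, hdnot] at this
      simpa using this

theorem key_cond_eq (k bl : String) (hk : ' ' ∉ k.toList) :
    (k == bl || PySem.Str.startswith bl (k ++ " ")) =
      (k == String.ofList (bl.toList.takeWhile (· ≠ ' '))) := by
  rw [Bool.eq_iff_iff]
  simp only [Bool.or_eq_true, beq_iff_eq, PySem.Str.startswith_eq, PySem.Chars.startswith_iff,
    String.ext_iff, String.toList_append, String.toList_ofList,
    (by decide : (" " : String).toList = [' '])]
  exact (tok_iff k.toList bl.toList hk).trans (by constructor <;> exact fun h => h.symm)

-- A's scan over the pairs equals a dict lookup on the token, given per-pair condition equality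
theorem scan_eq_get (pairs : List (String × String)) (bl first : String)
    (h : ∀ p ∈ pairs, (p.1 == bl || PySem.Str.startswith bl (p.1 ++ " ")) = (p.1 == first)) :
    scanBrand pairs bl = PySem.Dict.get? ⟨pairs⟩ first := by
  induction pairs with
  | nil => simp [scanBrand, PySem.Dict.get?]
  | cons p rest ih =>
      obtain ⟨k, v⟩ := p
      have hp := h (k, v) (List.mem_cons_self)
      have hrest := ih (fun q hq => h q (List.mem_cons_of_mem _ hq))
      simp only [scanBrand, PySem.Dict.get?, List.find?] at *
      rw [hp]
      by_cases hkf : (k == first) = true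
      · simp [hkf]
      · simp only [Bool.not_eq_true] at hkf
        simp [hkf, hrest]

-- ===== VERDICT (by name: the statement is the Claim_ definition above) =====
theorem normalize_brand_name_spec : Claim_equal_normalize_brand_name := by
  intro brand _
  unfold Spec_normalize_brand_name normalize_brand_name normalize_brand_name_alt
  by_cases hb : brand == ""
  · simp [hb]
  · simp only [hb, Bool.false_eq_true, if_false]
    rw [brandAlias_entries, firstTok_eq, titleFold_eq, scan_eq_get brandPairs _ _ ?_]
    intro p hp
    have hkeys : ' ' ∉ p.1.toList := by fin_cases hp <;> decide
    exact key_cond_eq p.1 _ hkeys
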